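-- pv_equiv track=rewrite | github.com/sopac/ocean-portal-docker | ocean/processing/Calculate_MultiMonth_Averages.py | _get_months_for_averaging
-- ===== SOURCE A (Python) =====
-- def _get_months_for_averaging(end_date_year, end_date_month, n_months):
--     """
--     Get list of consecutive months of length n_months that end on the
--     date specified by end_date_year and end_date_month.
--         Output argument is a list of tuples in format:
--                 [(year1, month1), (year2, month2), ...]
--     """
--     year_counter = end_date_year
--     month_counter = end_date_month
--     datelist = []
--
--     for k in range(n_months):
--         datelist.append((year_counter, month_counter))
--         month_counter = month_counter - 1
--         if month_counter == 0:
--             month_counter = 12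
--             year_counter = year_counter - 1
--
--     # Reverse list so dates are in chronological order
--     datelist = datelist[::-1]
--     return datelist
-- ===== SOURCE B (Python) =====
-- def _get_months_for_averaging(end_date_year, end_date_month, n_months):
--     """
--     List of n_months consecutive (year, month) pairs in chronological
--     order, ending at (end_date_year, end_date_month): each date is an
--     absolute month index, decoded back with divmod.
--     """
--     end = end_date_year * 12 + end_date_month - 1
--     return [(idx // 12, idx % 12 + 1)
--             for idx in range(end - n_months + 1, end + 1)]
-- ===== Notes on version B (the rewrite author's own statement) =====
-- stated objective: simpler
-- what changed: Replaces the backward counter with a wrap branch plus final reversal by converting the end date to an absolute month index and decoding each element with divmod, emitting the list already in chronological order; Pre_ excludes only invalid end months (m<1 or m>12) with a positive n_months, where A propagates the raw out-of-range month value while B normalizes it -- neither value is specified for an invalid date.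
-- outside the precondition, e.g. on _get_months_for_averaging(2000, 0, 2): A returns [(2000, -1), (2000, 0)], B returns [(1999, 11), (1999, 12)]; on _get_months_for_averaging(2000, 13, 2): A returns [(2000, 12), (2000, 13)], B returns [(2000, 12), (2001, 1)]
import Mathlib
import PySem

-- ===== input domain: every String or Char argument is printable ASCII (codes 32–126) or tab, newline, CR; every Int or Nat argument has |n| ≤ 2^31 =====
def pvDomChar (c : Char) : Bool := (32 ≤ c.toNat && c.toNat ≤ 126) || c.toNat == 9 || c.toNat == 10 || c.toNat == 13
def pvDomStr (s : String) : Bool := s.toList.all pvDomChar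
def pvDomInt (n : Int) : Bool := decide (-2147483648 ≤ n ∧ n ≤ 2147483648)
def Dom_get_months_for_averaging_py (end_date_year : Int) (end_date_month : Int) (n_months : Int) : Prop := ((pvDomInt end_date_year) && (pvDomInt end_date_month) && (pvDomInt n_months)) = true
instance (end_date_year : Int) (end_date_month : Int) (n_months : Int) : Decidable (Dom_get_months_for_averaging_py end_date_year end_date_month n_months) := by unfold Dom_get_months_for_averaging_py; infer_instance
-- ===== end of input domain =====

-- B replaces A's backward counter-with-wrap plus final reversal by absolute month
-- indices decoded with divmod, emitting the list already in chronological order (simpler).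

-- ===== PORT A =====
-- literal port: the loop state is (year_counter, month_counter, datelist);
-- datelist[::-1] is exactly List.reverse
def get_months_for_averaging_py (end_date_year : Int) (end_date_month : Int) (n_months : Int) : List (Int × Int) :=
  let st := (PySem.List.pyRange 0 n_months 1).foldl
    (fun (st : Int × Int × List (Int × Int)) (_k : Int) =>
      let datelist := st.2.2 ++ [(st.1, st.2.1)]
      let month_counter := st.2.1 - 1
      if month_counter = 0 then (st.1 - 1, 12, datelist)
      else (st.1, month_counter, datelist))
    (end_date_year, end_date_month, ([] : List (Int × Int)))
  st.2.2.reverse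

-- ===== PORT B =====
-- Source B's comprehension: each absolute month index idx decoded as (idx // 12, idx % 12 + 1)
def get_months_for_averaging_py_alt (end_date_year : Int) (end_date_month : Int) (n_months : Int) : List (Int × Int) :=
  let e := end_date_year * 12 + end_date_month - 1
  (PySem.List.pyRange (e - n_months + 1) (e + 1) 1).map
    (fun idx => (PySem.Int.floordiv idx 12, PySem.Int.mod idx 12 + 1))

-- ===== PRECONDITION & SPEC =====
-- Pre_ restricts to the natural domain of valid calendar months 1..12 (A returns on all
-- inputs, but for an invalid month, e.g. 0 or 13, A propagates the raw out-of-range value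
-- while B normalizes it via divmod; neither value is specified for an invalid date);
-- for n_months ≤ 0 the result is [] independently of the month, so those inputs are kept.
def Pre_get_months_for_averaging_py (end_date_year : Int) (end_date_month : Int) (n_months : Int) : Prop :=
  (1 ≤ end_date_month ∧ end_date_month ≤ 12) ∨ n_months ≤ 0
instance (end_date_year : Int) (end_date_month : Int) (n_months : Int) : Decidable (Pre_get_months_for_averaging_py end_date_year end_date_month n_months) := by unfold Pre_get_months_for_averaging_py; infer_instance

def pvWitness_get_months_for_averaging_py : Int × Int × Int := (2024, 2, 4)

def Spec_get_months_for_averaging_py (end_date_year : Int) (end_date_month : Int) (n_months : Int) (out : List (Int × Int)) : Prop := out = get_months_for_averaging_py_alt end_date_year end_date_month n_months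
instance (end_date_year : Int) (end_date_month : Int) (n_months : Int) (out : List (Int × Int)) : Decidable (Spec_get_months_for_averaging_py end_date_year end_date_month n_months out) := by unfold Spec_get_months_for_averaging_py; infer_instance

-- ===== CLAIM (what is proved, stated in full; the proofs are below) =====
def Claim_equal_get_months_for_averaging_py : Prop := ∀ (end_date_year : Int) (end_date_month : Int) (n_months : Int), Dom_get_months_for_averaging_py end_date_year end_date_month n_months → Pre_get_months_for_averaging_py end_date_year end_date_month n_months → Spec_get_months_for_averaging_py end_date_year end_date_month n_months (get_months_for_averaging_py end_date_year end_date_month n_months)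

-- ===== LEMMAS AND PROOFS =====

-- the counter step of A's loop, on the (year, month) pair alone
def pvStepA (p : Int × Int) : Int × Int :=
  if p.2 - 1 = 0 then (p.1 - 1, 12) else (p.1, p.2 - 1)

-- B's decoding of an absolute month index
def pvDec (d : Int) : Int × Int :=
  (PySem.Int.floordiv d 12, PySem.Int.mod d 12 + 1)

-- A's fold over any k-element list: counters iterate pvStepA, datelist collects the iterates
lemma pvFoldA (l : List Int) (y m : Int) (acc : List (Int × Int)) :
    l.foldl
      (fun (st : Int × Int × List (Int × Int)) (_k : Int) =>
        let datelist := st.2.2 ++ [(st.1, st.2.1)]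
        let month_counter := st.2.1 - 1
        if month_counter = 0 then (st.1 - 1, 12, datelist)
        else (st.1, month_counter, datelist))
      (y, m, acc)
    = ((pvStepA^[l.length] (y, m)).1, (pvStepA^[l.length] (y, m)).2,
       acc ++ (List.range l.length).map (fun i => pvStepA^[i] (y, m))) := by
  induction l generalizing y m acc with
  | nil => simp
  | cons a l ih =>
    simp only [List.foldl_cons, List.length_cons]
    have hstep : (if m - 1 = 0 then (y - 1, (12 : Int), acc ++ [(y, m)])
        else (y, m - 1, acc ++ [(y, m)]))
        = ((pvStepA (y, m)).1, (pvStepA (y, m)).2, acc ++ [(y, m)]) := by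
      simp only [pvStepA]; split_ifs <;> rfl
    rw [hstep, ih, List.range_succ_eq_map]
    simp [Function.iterate_succ_apply, List.append_assoc, Function.comp_def]

-- one backward month step on a decoded index
lemma pvStep_dec (d : Int) : pvStepA (pvDec d) = pvDec (d - 1) := by
  have h1 := Int.ediv_add_emod d 12
  have h2 := Int.emod_nonneg d (show (12:Int) ≠ 0 by norm_num)
  have h3 := Int.emod_lt_of_pos d (show (0:Int) < 12 by norm_num)
  have h4 := Int.ediv_add_emod (d - 1) 12
  have h5 := Int.emod_nonneg (d - 1) (show (12:Int) ≠ 0 by norm_num)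
  have h6 := Int.emod_lt_of_pos (d - 1) (show (0:Int) < 12 by norm_num)
  simp only [pvStepA, pvDec,
    PySem.Int.floordiv_eq_ediv_of_pos (show (0:Int) < 12 by norm_num),
    PySem.Int.mod_eq_emod_of_pos (show (0:Int) < 12 by norm_num)]
  split_ifs with h <;> refine Prod.ext ?_ ?_ <;> simp <;> omega

-- for a valid end month, the iterated counter equals B's decoding of the shifted index
lemma pvIter_eq_dec (y m : Int) (hm : 1 ≤ m ∧ m ≤ 12) (j : Nat) :
    pvStepA^[j] (y, m) = pvDec (y * 12 + m - 1 - j) := by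
  induction j with
  | zero =>
    have h1 := Int.ediv_add_emod (y * 12 + m - 1) 12
    have h2 := Int.emod_nonneg (y * 12 + m - 1) (show (12:Int) ≠ 0 by norm_num)
    have h3 := Int.emod_lt_of_pos (y * 12 + m - 1) (show (0:Int) < 12 by norm_num)
    simp only [Function.iterate_zero, id_eq, pvDec,
      PySem.Int.floordiv_eq_ediv_of_pos (show (0:Int) < 12 by norm_num),
      PySem.Int.mod_eq_emod_of_pos (show (0:Int) < 12 by norm_num)]
    refine Prod.ext ?_ ?_ <;> simp <;> omega
  | succ j ih =>
    rw [Function.iterate_succ_apply', ih, pvStep_dec]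
    congr 1
    push_cast
    ring

-- both programs return [] for non-positive n_months
lemma pv_empty (y m n : Int) (hn : n ≤ 0) :
    get_months_for_averaging_py y m n = get_months_for_averaging_py_alt y m n := by
  have hA : PySem.List.pyRange 0 n 1 = [] := PySem.List.pyRange_one_eq_nil (by omega)
  have hB : PySem.List.pyRange (y * 12 + m - 1 - n + 1) (y * 12 + m) 1 = [] :=
    PySem.List.pyRange_one_eq_nil (by omega)
  simp [get_months_for_averaging_py, get_months_for_averaging_py_alt, hA, hB]

theorem pv_main (y m n : Int) (hm : 1 ≤ m ∧ m ≤ 12) :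
    get_months_for_averaging_py y m n = get_months_for_averaging_py_alt y m n := by
  unfold get_months_for_averaging_py get_months_for_averaging_py_alt
  rw [pvFoldA]
  simp only [PySem.List.pyRange_one, Int.sub_zero, List.length_map, List.length_range,
    List.map_map, List.nil_append]
  apply List.ext_getElem
  · simp; omega
  · intro i h1 h2
    simp only [List.length_reverse, List.length_map, List.length_range] at h1 h2
    simp only [List.getElem_reverse, List.getElem_map, List.getElem_range, Function.comp_def,
      List.length_map, List.length_range]
    rw [pvIter_eq_dec y m hm]
    show _ = pvDec _
    congr 1
    omega

-- ===== VERDICT (by name: the statement is the Claim_ definition above) =====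
theorem get_months_for_averaging_py_spec : Claim_equal_get_months_for_averaging_py := by
  intro y m n _ hpre
  unfold Spec_get_months_for_averaging_py
  rcases hpre with hm | hn
  · exact pv_main y m n hm
  · exact pv_empty y m n hn
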